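-- pv_equiv track=rewrite | github.com/saurabhaloneai/Hakken | src/hakken/utils/json_utils.py | is_valid_json_start
-- ===== SOURCE A (Python) =====
-- def is_valid_json_start(s: str) -> bool:
--     """Check if string starts with valid JSON character."""
--     idx = 0
--     while idx < len(s):
--         if s[idx] in ' \t\n\r':
--             idx += 1
--             continue
--         return (
--             s[idx] in '{["' or
--             s[idx:idx+4] in ('true', 'null') or
--             s[idx:idx+5] == 'false' or
--             s[idx].isdigit() or
--             s[idx] == '-'
--         )
--     return False
-- ===== SOURCE B (Python) =====
-- def is_valid_json_start(s: str) -> bool: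
--     """Check if string starts with valid JSON character."""
--     # Single forward pass character automaton: skip whitespace, then either
--     # decide on one character, or match a keyword suffix char-by-char via the
--     # `expect` accumulator (no slicing, no lstrip).
--     expect = None  # remaining characters of a keyword still to be matched
--     for ch in s:
--         if expect is None:
--             if ch in ' \t\n\r':
--                 continue
--             if ch in '{["-' or ch.isdigit():
--                 return True
--             if ch == 't':
--                 expect = 'rue'
--             elif ch == 'n':
--                 expect = 'ull'
--             elif ch == 'f':
--                 expect = 'alse'
--             else:
--                 return False
--         else:
--             if ch != expect[0]:
--                 return False
--             expect = expect[1:]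
--             if not expect:
--                 return True
--     return False
-- ===== Notes on version B (the rewrite author's own statement) =====
-- stated objective: alternative
-- what changed: Replaces A's index-walking loop with slice comparisons by a single forward character-at-a-time automaton: whitespace is skipped, single-character starts decide immediately, and the keywords true/null/false are matched char by char through an accumulator holding the keyword suffix still expected, with no slicing or lstrip.
import Mathlib
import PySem

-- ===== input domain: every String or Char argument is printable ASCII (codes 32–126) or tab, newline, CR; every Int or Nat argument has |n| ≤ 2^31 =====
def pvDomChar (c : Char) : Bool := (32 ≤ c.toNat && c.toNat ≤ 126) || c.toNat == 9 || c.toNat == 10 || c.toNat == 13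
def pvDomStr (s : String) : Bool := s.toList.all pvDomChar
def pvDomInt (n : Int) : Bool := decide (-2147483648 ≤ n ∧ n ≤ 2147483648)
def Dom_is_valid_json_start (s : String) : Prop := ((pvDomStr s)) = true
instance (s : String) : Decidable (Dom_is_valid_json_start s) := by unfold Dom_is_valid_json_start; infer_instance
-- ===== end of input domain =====

-- B replaces A's index-walk with slice comparisons by a one-pass character automaton
-- keeping an 'expect' keyword-suffix accumulator (alternative decomposition, same cost).

-- ===== PORT A =====
-- A's `idx` walks past whitespace; advancing idx over s is recursing on the remaining
-- characters, so s[idx:idx+k] is `take k` of the remainder (exact).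
def isValidJsonStartLoopA : List Char → Bool
  | [] => false
  | c :: rest =>
    if [' ', '\t', '\n', '\r'].contains c then isValidJsonStartLoopA rest
    else
      ['{', '[', '"'].contains c
      || ((c :: rest).take 4 == "true".toList)
      || ((c :: rest).take 4 == "null".toList)
      || ((c :: rest).take 5 == "false".toList)
      || PySem.Chars.isdigit c
      || (c == '-')

def is_valid_json_start (s : String) : Bool := isValidJsonStartLoopA s.toList

-- ===== PORT B =====
-- Source B's for-loop over the characters with the `expect` state; `expect[0]` is only
-- reached with `expect` nonempty (Source B keeps it nonempty), the `some []` row is the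
-- unreachable filler for that pattern.
def isValidJsonStartAutoB : List Char → Option (List Char) → Bool
  | [], _ => false
  | ch :: rest, none =>
    if [' ', '\t', '\n', '\r'].contains ch then isValidJsonStartAutoB rest none
    else if ['{', '[', '"', '-'].contains ch || PySem.Chars.isdigit ch then true
    else if ch == 't' then isValidJsonStartAutoB rest (some "rue".toList)
    else if ch == 'n' then isValidJsonStartAutoB rest (some "ull".toList)
    else if ch == 'f' then isValidJsonStartAutoB rest (some "alse".toList)
    else false
  | _ :: _, some [] => false
  | ch :: rest, some (e :: es) =>
    if ch != e then false
    else if es.isEmpty then true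
    else isValidJsonStartAutoB rest (some es)

def is_valid_json_start_alt (s : String) : Bool := isValidJsonStartAutoB s.toList none

-- ===== PRECONDITION & SPEC =====
def Spec_is_valid_json_start (s : String) (out : Bool) : Prop := out = is_valid_json_start_alt s
instance (s : String) (out : Bool) : Decidable (Spec_is_valid_json_start s out) := by unfold Spec_is_valid_json_start; infer_instance

-- ===== CLAIM (what is proved, stated in full; the proofs are below) =====
def Claim_equal_is_valid_json_start : Prop := ∀ (s : String), Dom_is_valid_json_start s → Spec_is_valid_json_start s (is_valid_json_start s)

-- ===== LEMMAS AND PROOFS =====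

-- In a keyword-matching state the automaton accepts iff the remaining input starts
-- with the expected (nonempty) suffix.
theorem autoB_some_eq_take (w : List Char) (hw : w ≠ []) :
    ∀ cs : List Char, isValidJsonStartAutoB cs (some w) = (cs.take w.length == w) := by
  induction w with
  | nil => exact absurd rfl hw
  | cons e es ih =>
    intro cs
    cases cs with
    | nil => simp [isValidJsonStartAutoB]
    | cons c rest =>
      by_cases hc : c = e
      · subst hc
        cases es with
        | nil => simp [isValidJsonStartAutoB]
        | cons e' es' =>
          have := ih (by simp) rest
          simp [isValidJsonStartAutoB, this]
      · simp [isValidJsonStartAutoB, hc, bne_iff_ne, Ne.symm]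

theorem loopA_eq_autoB (cs : List Char) :
    isValidJsonStartLoopA cs = isValidJsonStartAutoB cs none := by
  induction cs with
  | nil => rfl
  | cons c rest ih =>
    by_cases hws : ([' ', '\t', '\n', '\r'].contains c) = true
    · rw [isValidJsonStartLoopA, if_pos hws, isValidJsonStartAutoB, if_pos hws, ih]
    · rw [isValidJsonStartLoopA, if_neg hws, isValidJsonStartAutoB, if_neg hws]
      by_cases ht : c = 't'
      · subst ht
        have h := autoB_some_eq_take "rue".toList (by decide) rest
        simp [PySem.Chars.isdigit, List.take_succ_cons]
        exact h.symm
      · by_cases hn : c = 'n'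
        · subst hn
          have h := autoB_some_eq_take "ull".toList (by decide) rest
          simp [PySem.Chars.isdigit, List.take_succ_cons]
          exact h.symm
        · by_cases hf : c = 'f'
          · subst hf
            have h := autoB_some_eq_take "alse".toList (by decide) rest
            simp [PySem.Chars.isdigit, List.take_succ_cons]
            exact h.symm
          · -- c is none of t/n/f: A's keyword slice comparisons are all false
            have kt : ((c :: rest).take 4 == "true".toList) = false := by
              simp [List.take_succ_cons, ht]
            have kn : ((c :: rest).take 4 == "null".toList) = false := by
              simp [List.take_succ_cons, hn]
            have kf : ((c :: rest).take 5 == "false".toList) = false := by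
              simp [List.take_succ_cons, hf]
            rw [kt, kn, kf, Bool.eq_iff_iff]
            simp only [List.contains_cons, List.contains_nil, Bool.or_eq_true,
              beq_iff_eq, Bool.false_eq_true, or_false]
            split_ifs <;> simp_all <;> tauto

-- ===== VERDICT (by name: the statement is the Claim_ definition above) =====
theorem is_valid_json_start_spec : Claim_equal_is_valid_json_start := by
  intro s _
  unfold Spec_is_valid_json_start is_valid_json_start is_valid_json_start_alt
  exact loopA_eq_autoB s.toList
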